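-- pv_equiv track=rewrite | github.com/elgerytme/Pynomaly | src/packages/data/data_platform/science/domain/services/statistical_analysis_service.py | _calculate_consensus_outliers
-- ===== SOURCE A (Python) =====
-- def _calculate_consensus_outliers(outlier_indices_dict: dict[str, list[int]]) -> list[int]:
--     """Calculate consensus outliers from multiple methods."""
--     from collections import Counter
--
--     # Count how many methods detected each index as outlier
--     all_outliers = []
--     for indices in outlier_indices_dict.values():
--         all_outliers.extend(indices)
--
--     outlier_counts = Counter(all_outliers)
--
--     # Consider an outlier if detected by at least half of the methods
--     min_detections = max(1, len(outlier_indices_dict) // 2)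
--     consensus_outliers = [idx for idx, count in outlier_counts.items()
--                         if count >= min_detections]
--
--     return sorted(consensus_outliers)
-- ===== SOURCE B (Python) =====
-- def _calculate_consensus_outliers(outlier_indices_dict: dict[str, list[int]]) -> list[int]:
--     """Calculate consensus outliers: sort the flattened indices once and scan runs."""
--     from itertools import groupby
--
--     flat = sorted(idx for indices in outlier_indices_dict.values() for idx in indices)
--     min_detections = max(1, len(outlier_indices_dict) // 2)
--     return [idx for idx, group in groupby(flat)
--             if sum(1 for _ in group) >= min_detections]
-- ===== Notes on version B (the rewrite author's own statement) =====
-- stated objective: alternative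
-- what changed: Replaced A's hash-count (Counter) followed by a final sort of qualifying indices with one sort of the flattened index list followed by a single run-length (groupby) scan that emits qualifying values already in ascending order.
import Mathlib
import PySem

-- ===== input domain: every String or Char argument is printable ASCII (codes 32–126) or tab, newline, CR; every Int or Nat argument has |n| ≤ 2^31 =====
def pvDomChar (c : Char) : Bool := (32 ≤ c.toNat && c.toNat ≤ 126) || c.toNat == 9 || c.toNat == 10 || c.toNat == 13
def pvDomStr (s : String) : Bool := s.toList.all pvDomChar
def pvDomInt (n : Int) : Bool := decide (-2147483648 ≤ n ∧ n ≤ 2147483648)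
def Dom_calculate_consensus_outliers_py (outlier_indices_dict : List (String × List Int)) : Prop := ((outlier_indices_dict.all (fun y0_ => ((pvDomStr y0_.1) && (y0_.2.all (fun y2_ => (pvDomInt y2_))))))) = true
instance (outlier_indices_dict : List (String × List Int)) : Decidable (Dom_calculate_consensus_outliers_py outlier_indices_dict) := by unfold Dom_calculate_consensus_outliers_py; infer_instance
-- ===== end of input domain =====

-- B replaces A's Counter-then-sort with one sort of the flattened indices followed by a
-- single run-length (groupby) scan; objective: alternative algorithm of similar cost.

-- ===== PORT A =====
def calculate_consensus_outliers_py (outlier_indices_dict : List (String × List Int)) : List Int :=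
  let d := PySem.Dict.ofList outlier_indices_dict
  let all_outliers := d.values.foldl (fun acc indices => acc ++ indices) []
  let outlier_counts := PySem.Dict.counter all_outliers
  let min_detections : Int := max 1 (PySem.Int.floordiv (d.size : Int) 2)
  let consensus_outliers :=
    (outlier_counts.items.filter (fun p => min_detections ≤ p.2)).map (fun p => p.1)
  PySem.List.sorted consensus_outliers (fun x => x) false

-- ===== PORT B =====
-- run-length grouping of a list (itertools.groupby with the group lengths)
def pvGroups : List Int → List (Int × Int)
  | [] => []
  | x :: xs =>
    match pvGroups xs with
    | [] => [(x, 1)]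
    | (y, c) :: t => if x = y then (x, c + 1) :: t else (x, 1) :: (y, c) :: t

def calculate_consensus_outliers_py_alt (outlier_indices_dict : List (String × List Int)) : List Int :=
  let d := PySem.Dict.ofList outlier_indices_dict
  let flat := PySem.List.sorted (d.values.flatMap (fun indices => indices)) (fun x => x) false
  let min_detections : Int := max 1 (PySem.Int.floordiv (d.size : Int) 2)
  ((pvGroups flat).filter (fun p => min_detections ≤ p.2)).map (fun p => p.1)

-- ===== PRECONDITION & SPEC =====
def Spec_calculate_consensus_outliers_py (outlier_indices_dict : List (String × List Int)) (out : List Int) : Prop := out = calculate_consensus_outliers_py_alt outlier_indices_dict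
instance (outlier_indices_dict : List (String × List Int)) (out : List Int) : Decidable (Spec_calculate_consensus_outliers_py outlier_indices_dict out) := by unfold Spec_calculate_consensus_outliers_py; infer_instance

-- ===== CLAIM (what is proved, stated in full; the proofs are below) =====
def Claim_equal_calculate_consensus_outliers_py : Prop := ∀ (outlier_indices_dict : List (String × List Int)), Dom_calculate_consensus_outliers_py outlier_indices_dict → Spec_calculate_consensus_outliers_py outlier_indices_dict (calculate_consensus_outliers_py outlier_indices_dict)

-- ===== LEMMAS AND PROOFS =====

-- equation lemmas for pvGroups
lemma pvGroups_nil_case (x : Int) (l : List Int) (h : pvGroups l = []) :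
    pvGroups (x :: l) = [(x, 1)] := by unfold pvGroups; rw [h]

lemma pvGroups_same (x c : Int) (t : List (Int × Int)) (l : List Int)
    (h : pvGroups l = (x, c) :: t) : pvGroups (x :: l) = (x, c + 1) :: t := by
  unfold pvGroups; rw [h]; simp

lemma pvGroups_diff (x y c : Int) (t : List (Int × Int)) (l : List Int) (hne : x ≠ y)
    (h : pvGroups l = (y, c) :: t) : pvGroups (x :: l) = (x, 1) :: (y, c) :: t := by
  unfold pvGroups; rw [h]; simp [hne]

-- the head of pvGroups (x :: l) carries x
lemma pvGroups_cons (x : Int) (l : List Int) : ∃ c t, pvGroups (x :: l) = (x, c) :: t := by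
  cases h : pvGroups l with
  | nil => exact ⟨1, [], pvGroups_nil_case x l h⟩
  | cons p t =>
    obtain ⟨y, c⟩ := p
    by_cases hxy : x = y
    · subst hxy; exact ⟨c + 1, t, pvGroups_same x c t l h⟩
    · exact ⟨1, (y, c) :: t, pvGroups_diff x y c t l hxy h⟩

lemma pvGroups_fst_mem (s : List Int) (v : Int) : v ∈ (pvGroups s).map (·.1) ↔ v ∈ s := by
  induction s with
  | nil => simp [pvGroups]
  | cons x xs ih =>
    cases h : pvGroups xs with
    | nil =>
      have hnil : xs = [] := by
        cases xs with
        | nil => rfl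
        | cons a l => obtain ⟨c, t, hct⟩ := pvGroups_cons a l; rw [hct] at h; simp at h
      rw [pvGroups_nil_case x xs h, hnil]
      simp
    | cons p t =>
      obtain ⟨y, c⟩ := p
      rw [h] at ih
      by_cases hxy : x = y
      · subst hxy
        rw [pvGroups_same x c t xs h]
        simp only [List.map_cons, List.mem_cons] at ih ⊢
        tauto
      · rw [pvGroups_diff x y c t xs hxy h]
        simp only [List.map_cons, List.mem_cons] at ih ⊢
        tauto

-- for a ≤-sorted list, pvGroups carries exact total counts and strictly increasing values
lemma pvGroups_sorted_spec (s : List Int) (hs : s.Pairwise (· ≤ ·)) :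
    (∀ p ∈ pvGroups s, p.2 = (s.count p.1 : Int)) ∧
    ((pvGroups s).map (·.1)).Pairwise (· < ·) := by
  induction s with
  | nil => simp [pvGroups]
  | cons x xs ih =>
    have hxs : xs.Pairwise (· ≤ ·) := hs.tail
    have hle : ∀ y ∈ xs, x ≤ y := (List.pairwise_cons.mp hs).1
    obtain ⟨ihc, ihp⟩ := ih hxs
    cases h : pvGroups xs with
    | nil =>
      have hnil : xs = [] := by
        cases xs with
        | nil => rfl
        | cons a l => obtain ⟨c, t, hct⟩ := pvGroups_cons a l; rw [hct] at h; simp at h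
      rw [pvGroups_nil_case x xs h]
      subst hnil
      refine ⟨?_, by simp⟩
      intro p hp; simp at hp; subst hp; simp
    | cons p t =>
      obtain ⟨y, c⟩ := p
      rw [h] at ihc ihp
      have hyx : x ≤ y := hle y ((pvGroups_fst_mem xs y).mp (by simp [h]))
      have hallge : ∀ v ∈ ((y, c) :: t).map (·.1), y ≤ v := by
        intro v hv
        simp only [List.map_cons, List.mem_cons] at hv
        rcases hv with rfl | hv
        · exact le_refl v
        · exact le_of_lt ((List.pairwise_cons.mp ihp).1 v hv)
      by_cases hxy : x = y
      · subst hxy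
        rw [pvGroups_same x c t xs h]
        constructor
        · intro p hp
          rcases List.mem_cons.mp hp with rfl | hp
          · have hcx := ihc (x, c) (List.mem_cons_self ..)
            simp only [List.count_cons] at *
            simp at hcx ⊢
            omega
          · have hpx : x < p.1 := (List.pairwise_cons.mp ihp).1 p.1 (List.mem_map_of_mem hp)
            have hcp := ihc p (List.mem_cons_of_mem _ hp)
            have hne : ¬ (x = p.1) := by omega
            rw [hcp, List.count_cons]
            simp [hne]
        · simpa using ihp
      · have hlt : x < y := lt_of_le_of_ne hyx hxy
        have hxnot : x ∉ xs := by
          intro hmem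
          have hx' := (pvGroups_fst_mem xs x).mpr hmem
          rw [h] at hx'
          have := hallge x hx'
          omega
        rw [pvGroups_diff x y c t xs hxy h]
        constructor
        · intro p hp
          rcases List.mem_cons.mp hp with rfl | hp
          · simp [List.count_eq_zero_of_not_mem hxnot]
          · have hcp := ihc p hp
            have hyp : y ≤ p.1 := hallge p.1 (List.mem_map_of_mem hp)
            have hne : ¬ (x = p.1) := by omega
            rw [hcp, List.count_cons]
            simp [hne]
        · simp only [List.map_cons]
          refine List.pairwise_cons.mpr ⟨?_, ihp⟩
          intro v hv
          rcases List.mem_cons.mp hv with rfl | hv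
          · exact hlt
          · exact lt_of_lt_of_le hlt (hallge v (List.mem_cons_of_mem _ hv))

-- the shared core: A's counter pipeline equals B's sort-and-group pipeline,
-- for any flattened list `all` and threshold `m`
lemma core_eq (all : List Int) (m : Int) :
    PySem.List.sorted
      ((((PySem.Dict.counter all).items).filter (fun p => m ≤ p.2)).map (fun p => p.1))
      (fun x => x) false
    = ((pvGroups (PySem.List.sorted all (fun x => x) false)).filter (fun p => m ≤ p.2)).map
        (fun p => p.1) := by
  set s := PySem.List.sorted all (fun x => x) false with hs
  have hperm : s.Perm all := PySem.List.sorted_perm all _ _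
  have hsort : s.Pairwise (· ≤ ·) := by
    have := PySem.List.sorted_pairwise all (fun x => x)
    simpa using this
  obtain ⟨hcnt, hpw⟩ := pvGroups_sorted_spec s hsort
  -- left side: filter over the deduplicated values with their total counts
  rw [PySem.Dict.items_counter]
  rw [List.filter_map, List.map_map]
  have hmapid : ((fun p => p.1) ∘ fun k => (k, (all.count k : Int))) = id := by
    funext k; rfl
  rw [hmapid, List.map_id]
  -- the right side is strictly increasing and a permutation of the left list
  set B := ((pvGroups s).filter (fun p => m ≤ p.2)).map (fun p => p.1) with hB
  have hBpw : B.Pairwise (· < ·) := by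
    apply List.Pairwise.sublist (List.Sublist.map _ List.filter_sublist) hpw
  have hBnd : B.Nodup := hBpw.imp (fun h => ne_of_lt h)
  have hLnd : ((PySem.Set.ofList all).filter
      (Function.comp (fun p => decide (m ≤ p.2)) fun k => (k, (all.count k : Int)))).Nodup :=
    (PySem.Set.nodup_ofList all).filter _
  have hmem : ∀ v : Int, v ∈ B ↔
      v ∈ (PySem.Set.ofList all).filter
        (Function.comp (fun p => decide (m ≤ p.2)) fun k => (k, (all.count k : Int))) := by
    intro v
    simp only [hB, List.mem_map, List.mem_filter, Function.comp]
    constructor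
    · rintro ⟨p, ⟨hp, hm⟩, rfl⟩
      have hc := hcnt p hp
      have hv : p.1 ∈ s := (pvGroups_fst_mem s p.1).mp (List.mem_map_of_mem hp)
      refine ⟨(PySem.Set.mem_ofList all p.1).mpr (hperm.mem_iff.mp hv), ?_⟩
      rw [hc] at hm
      rw [hperm.count_eq] at hm
      simpa using hm
    · rintro ⟨hv, hm⟩
      have hvs : v ∈ s := hperm.mem_iff.mpr ((PySem.Set.mem_ofList all v).mp hv)
      obtain ⟨p, hp, hfst⟩ := List.mem_map.mp ((pvGroups_fst_mem s v).mpr hvs)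
      refine ⟨p, ⟨hp, ?_⟩, hfst⟩
      rw [hcnt p hp, hfst, hperm.count_eq]
      simpa using hm
  have hpermB : B.Perm ((PySem.Set.ofList all).filter
      (Function.comp (fun p => decide (m ≤ p.2)) fun k => (k, (all.count k : Int)))) :=
    (List.perm_ext_iff_of_nodup hBnd hLnd).mpr hmem
  exact PySem.List.sorted_eq_of_perm_of_pairwise_lt _ B _ hpermB (by simpa using hBpw)

-- ===== VERDICT (by name: the statement is the Claim_ definition above) =====
theorem calculate_consensus_outliers_py_spec : Claim_equal_calculate_consensus_outliers_py := by
  intro d _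
  unfold Spec_calculate_consensus_outliers_py
  unfold calculate_consensus_outliers_py calculate_consensus_outliers_py_alt
  simp only []
  rw [PySem.List.foldl_append_eq_flatMap]
  rw [List.nil_append]
  exact core_eq _ _
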